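-- pv_equiv track=rewrite | github.com/ghostshell27/Aegis-2 | backend/services/session_service.py | _repair_latex_in_math
-- ===== SOURCE A (Python) =====
-- _LATEX_COMMANDS = frozenset((
--     # roots / fractions / binomials
--     "sqrt", "frac", "dfrac", "tfrac", "binom", "dbinom", "tbinom",
--     # operators
--     "sum", "prod", "int", "iint", "iiint", "oint", "lim", "limsup", "liminf",
--     "sup", "inf", "max", "min", "arg", "log", "ln", "lg", "exp",
--     "sin", "cos", "tan", "sec", "csc", "cot", "arcsin", "arccos", "arctan",
--     "sinh", "cosh", "tanh", "deg", "det", "dim", "ker", "gcd", "mod",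
--     # greek
--     "alpha", "beta", "gamma", "delta", "epsilon", "varepsilon", "zeta",
--     "eta", "theta", "vartheta", "iota", "kappa", "lambda", "mu", "nu", "xi",
--     "omicron", "pi", "varpi", "rho", "varrho", "sigma", "varsigma", "tau",
--     "upsilon", "phi", "varphi", "chi", "psi", "omega",
--     "Gamma", "Delta", "Theta", "Lambda", "Xi", "Pi", "Sigma", "Upsilon",
--     "Phi", "Psi", "Omega",
--     # blackboard / cal / frak / bf / it / rm / sf / tt / scr / bbm
--     "mathbb", "mathbf", "mathit", "mathrm", "mathcal", "mathfrak",
--     "mathsf", "mathtt", "mathscr", "boldsymbol",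
--     # text + decorations
--     "text", "textit", "textbf", "textrm", "textsf", "texttt",
--     "overline", "underline", "overrightarrow", "overleftarrow",
--     "widehat", "widetilde", "hat", "tilde", "bar", "vec", "dot", "ddot",
--     # spacing
--     "quad", "qquad", "thinspace", "negthinspace", "medspace", "negmedspace",
--     "thickspace", "negthickspace",
--     # ellipses / dots
--     "ldots", "cdots", "vdots", "ddots", "dotsb", "dotsc", "dotsi", "dotsm",
--     # relations
--     "leq", "geq", "neq", "ne", "le", "ge", "approx", "sim", "simeq",
--     "equiv", "propto", "cong", "subset", "supset", "subseteq", "supseteq",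
--     "in", "notin", "ni", "cup", "cap", "setminus", "emptyset", "varnothing",
--     # arrows
--     "to", "rightarrow", "leftarrow", "Rightarrow", "Leftarrow",
--     "leftrightarrow", "Leftrightarrow", "longrightarrow", "longleftarrow",
--     "mapsto", "implies", "iff",
--     # binary operators
--     "cdot", "times", "div", "pm", "mp", "ast", "star", "circ", "bullet",
--     "oplus", "ominus", "otimes", "oslash", "odot",
--     # qualifiers / quantifiers
--     "infty", "partial", "nabla", "forall", "exists", "neg", "lnot", "lor",
--     "land", "lnot",
--     # delimiters
--     "left", "right", "big", "Big", "bigg", "Bigg",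
--     "lfloor", "rfloor", "lceil", "rceil", "langle", "rangle",
--     # matrix / array helpers (the env names)
--     "begin", "end",
--     # misc
--     "boxed", "color", "textcolor", "phantom", "hphantom", "vphantom",
--     "stackrel", "underset", "overset",
-- ))
--
-- def _repair_latex_in_math(message: str) -> str:
--     """If the AI dropped backslashes inside ``$...$`` or ``$$...$$`` blocks,
--     add them back for known LaTeX commands so KaTeX can render the math.
--
--     A purely textual heuristic: walk the string, track whether we're inside
--     a math delimiter, and prepend ``\\`` to alphabetic runs that match a
--     known command and aren't already preceded by a backslash.
--     """
--     if not message or "$" not in message: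
--         return message
--     out: list[str] = []
--     i = 0
--     n = len(message)
--     inline = False
--     display = False
--     while i < n:
--         ch = message[i]
--         # Toggle display math first ($$...$$).
--         if ch == "$" and i + 1 < n and message[i + 1] == "$":
--             display = not display
--             out.append("$$")
--             i += 2
--             continue
--         if ch == "$" and not display:
--             inline = not inline
--             out.append("$")
--             i += 1
--             continue
--         if (inline or display) and ch.isalpha():
--             j = i
--             while j < n and message[j].isalpha():
--                 j += 1
--             word = message[i:j]
--             preceded_by_bs = i > 0 and message[i - 1] == "\\"
--             if not preceded_by_bs and word in _LATEX_COMMANDS: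
--                 out.append("\\")
--                 out.append(word)
--             else:
--                 out.append(word)
--             i = j
--             continue
--         out.append(ch)
--         i += 1
--     return "".join(out)
-- ===== SOURCE B (Python) =====
-- _LATEX_COMMANDS = frozenset((
--     "sqrt", "frac", "dfrac", "tfrac", "binom", "dbinom", "tbinom",
--     "sum", "prod", "int", "iint", "iiint", "oint", "lim", "limsup", "liminf",
--     "sup", "inf", "max", "min", "arg", "log", "ln", "lg", "exp",
--     "sin", "cos", "tan", "sec", "csc", "cot", "arcsin", "arccos", "arctan",
--     "sinh", "cosh", "tanh", "deg", "det", "dim", "ker", "gcd", "mod",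
--     "alpha", "beta", "gamma", "delta", "epsilon", "varepsilon", "zeta",
--     "eta", "theta", "vartheta", "iota", "kappa", "lambda", "mu", "nu", "xi",
--     "omicron", "pi", "varpi", "rho", "varrho", "sigma", "varsigma", "tau",
--     "upsilon", "phi", "varphi", "chi", "psi", "omega",
--     "Gamma", "Delta", "Theta", "Lambda", "Xi", "Pi", "Sigma", "Upsilon",
--     "Phi", "Psi", "Omega",
--     "mathbb", "mathbf", "mathit", "mathrm", "mathcal", "mathfrak",
--     "mathsf", "mathtt", "mathscr", "boldsymbol",
--     "text", "textit", "textbf", "textrm", "textsf", "texttt",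
--     "overline", "underline", "overrightarrow", "overleftarrow",
--     "widehat", "widetilde", "hat", "tilde", "bar", "vec", "dot", "ddot",
--     "quad", "qquad", "thinspace", "negthinspace", "medspace", "negmedspace",
--     "thickspace", "negthickspace",
--     "ldots", "cdots", "vdots", "ddots", "dotsb", "dotsc", "dotsi", "dotsm",
--     "leq", "geq", "neq", "ne", "le", "ge", "approx", "sim", "simeq",
--     "equiv", "propto", "cong", "subset", "supset", "subseteq", "supseteq",
--     "in", "notin", "ni", "cup", "cap", "setminus", "emptyset", "varnothing",
--     "to", "rightarrow", "leftarrow", "Rightarrow", "Leftarrow",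
--     "leftrightarrow", "Leftrightarrow", "longrightarrow", "longleftarrow",
--     "mapsto", "implies", "iff",
--     "cdot", "times", "div", "pm", "mp", "ast", "star", "circ", "bullet",
--     "oplus", "ominus", "otimes", "oslash", "odot",
--     "infty", "partial", "nabla", "forall", "exists", "neg", "lnot", "lor",
--     "land", "lnot",
--     "left", "right", "big", "Big", "bigg", "Bigg",
--     "lfloor", "rfloor", "lceil", "rceil", "langle", "rangle",
--     "begin", "end",
--     "boxed", "color", "textcolor", "phantom", "hphantom", "vphantom",
--     "stackrel", "underset", "overset",
-- ))
--
--
-- def _repair_latex_in_math(message: str) -> str: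
--     """Single streaming pass: buffer the current alphabetic run and flush it
--     (escaping known commands when inside math) at every run boundary, instead
--     of index lookahead/lookbehind scans."""
--     if not message or "$" not in message:
--         return message
--     out = []
--     buf = []            # current maximal alphabetic run, not yet emitted
--     prev = None         # character immediately before the buffered run
--     inline = display = False
--
--     def flush():
--         if buf:
--             w = "".join(buf)
--             if (inline or display) and w in _LATEX_COMMANDS and prev != "\\":
--                 out.append("\\")
--             out.append(w)
--             buf.clear()
--
--     k = 0
--     n = len(message)
--     while k < n:
--         c = message[k]
--         if c == "$":
--             flush()
--             if k + 1 < n and message[k + 1] == "$":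
--                 display = not display
--                 out.append("$$")
--                 prev = "$"
--                 k += 2
--                 continue
--             if not display:
--                 inline = not inline
--             out.append("$")
--             prev = "$"
--             k += 1
--             continue
--         if c.isalpha():
--             buf.append(c)
--             k += 1
--             continue
--         flush()
--         out.append(c)
--         prev = c
--         k += 1
--     flush()
--     return "".join(out)
-- ===== Notes on version B (the rewrite author's own statement) =====
-- stated objective: alternative
-- what changed: Replaces A's index-based loop with its inner lookahead word scan and lookbehind backslash test by a single streaming pass that buffers the current alphabetic run and a prev-character accumulator, flushing (and escaping) each run at its boundary.
import Mathlib
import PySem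

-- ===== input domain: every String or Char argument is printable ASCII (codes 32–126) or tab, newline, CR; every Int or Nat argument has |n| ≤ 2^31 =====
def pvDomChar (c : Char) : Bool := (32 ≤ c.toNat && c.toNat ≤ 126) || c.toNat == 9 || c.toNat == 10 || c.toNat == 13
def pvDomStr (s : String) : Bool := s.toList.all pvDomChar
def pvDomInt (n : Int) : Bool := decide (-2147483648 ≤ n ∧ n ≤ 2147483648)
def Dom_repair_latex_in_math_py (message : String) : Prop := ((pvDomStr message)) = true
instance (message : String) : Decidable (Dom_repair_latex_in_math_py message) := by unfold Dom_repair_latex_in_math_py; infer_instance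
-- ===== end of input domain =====

-- B replaces A's index-based loop (lookahead word scan + lookbehind backslash test)
-- by a single streaming pass over the character list that buffers the current
-- alphabetic run and flushes it at run boundaries (objective: alternative).

-- shared constant: the known-command set (frozenset in the Python module)
def pvCmds : List String := ["sqrt", "frac", "dfrac", "tfrac", "binom", "dbinom", "tbinom", "sum", "prod", "int", "iint", "iiint", "oint", "lim", "limsup", "liminf", "sup", "inf", "max", "min", "arg", "log", "ln", "lg", "exp", "sin", "cos", "tan", "sec", "csc", "cot", "arcsin", "arccos", "arctan", "sinh", "cosh", "tanh", "deg", "det", "dim", "ker", "gcd", "mod", "alpha", "beta", "gamma", "delta", "epsilon", "varepsilon", "zeta", "eta", "theta", "vartheta", "iota", "kappa", "lambda", "mu", "nu", "xi", "omicron", "pi", "varpi", "rho", "varrho", "sigma", "varsigma", "tau", "upsilon", "phi", "varphi", "chi", "psi", "omega", "Gamma", "Delta", "Theta", "Lambda", "Xi", "Pi", "Sigma", "Upsilon", "Phi", "Psi", "Omega", "mathbb", "mathbf", "mathit", "mathrm", "mathcal", "mathfrak", "mathsf", "mathtt", "mathscr", "boldsymbol", "text", "textit", "textbf", "textrm", "textsf",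 "texttt", "overline", "underline", "overrightarrow", "overleftarrow", "widehat", "widetilde", "hat", "tilde", "bar", "vec", "dot", "ddot", "quad", "qquad", "thinspace", "negthinspace", "medspace", "negmedspace", "thickspace", "negthickspace", "ldots", "cdots", "vdots", "ddots", "dotsb", "dotsc", "dotsi", "dotsm", "leq", "geq", "neq", "ne", "le", "ge", "approx", "sim", "simeq", "equiv", "propto", "cong", "subset", "supset", "subseteq", "supseteq", "in", "notin", "ni", "cup", "cap", "setminus", "emptyset", "varnothing", "to", "rightarrow", "leftarrow", "Rightarrow", "Leftarrow", "leftrightarrow", "Leftrightarrow", "longrightarrow", "longleftarrow", "mapsto", "implies", "iff", "cdot", "times", "div", "pm", "mp", "ast", "star", "circ", "bullet", "oplus", "ominus", "otimes", "oslash", "odot", "infty", "partial", "nabla", "forall", "exists", "neg", "lnot", "lor", "land", "lnot", "left", "right", "big", "Big", "bigg", "Bigg", "lfloor", "rfloor", "lceil", "rceil", "langle", "rangle", "begin", "end", "boxed", "color", "textcolor", "phantom", "hphantom", "vphantom", "stackrel", "underset", "overset"]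

-- ===== PORT A =====
-- A's inner scan 'while j < n and message[j].isalpha(): j += 1'
def pvAlphaEnd (ms : List Char) (n : Nat) (j : Nat) : Nat :=
  if h : j < n ∧ PySem.Chars.isalpha (ms.getD j ' ') = true then pvAlphaEnd ms n (j + 1) else j
  termination_by n - j
  decreasing_by exact Nat.sub_succ_lt_self n j h.1

theorem pvAlphaEnd_ge (ms : List Char) (n j : Nat) : j ≤ pvAlphaEnd ms n j := by
  rw [pvAlphaEnd]
  split_ifs with hc
  · exact Nat.le_of_succ_le (pvAlphaEnd_ge ms n (j + 1))
  · exact Nat.le_refl j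
  termination_by n - j
  decreasing_by exact Nat.sub_succ_lt_self n j hc.1

theorem pvAlphaEnd_gt (ms : List Char) (n j : Nat) (h1 : j < n)
    (h2 : PySem.Chars.isalpha (ms.getD j ' ') = true) : j < pvAlphaEnd ms n j := by
  rw [pvAlphaEnd, dif_pos ⟨h1, h2⟩]
  exact pvAlphaEnd_ge ms n (j + 1)

def pvALoop (ms : List Char) (n : Nat) (i : Nat) (inl disp : Bool) : List Char :=
  if hi : i < n then
    if ms.getD i ' ' = '$' ∧ i + 1 < n ∧ ms.getD (i + 1) ' ' = '$' then
      '$' :: '$' :: pvALoop ms n (i + 2) inl (!disp)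
    else if ms.getD i ' ' = '$' ∧ disp = false then
      '$' :: pvALoop ms n (i + 1) (!inl) disp
    else if ha : (inl || disp) = true ∧ PySem.Chars.isalpha (ms.getD i ' ') = true then
      let j := pvAlphaEnd ms n i
      let word := (ms.drop i).take (j - i)
      (if ¬ (0 < i ∧ ms.getD (i - 1) ' ' = '\\') ∧ String.mk word ∈ pvCmds then
        '\\' :: word else word) ++ pvALoop ms n j inl disp
    else ms.getD i ' ' :: pvALoop ms n (i + 1) inl disp
  else []
  termination_by n - i
  decreasing_by
  · exact Nat.sub_lt_sub_left hi (Nat.lt_succ_of_lt (Nat.lt_succ_self i))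
  · exact Nat.sub_succ_lt_self n i hi
  · exact Nat.sub_lt_sub_left hi (pvAlphaEnd_gt ms n i hi ha.2)
  · exact Nat.sub_succ_lt_self n i hi

def repair_latex_in_math_py (message : String) : String :=
  if message.toList = [] ∨ '$' ∉ message.toList then message
  else String.mk (pvALoop message.toList message.toList.length 0 false false)

-- ===== PORT B =====
-- B's 'flush()': emit the buffered alphabetic run, escaping known commands in math
def pvFlush (inl disp : Bool) (prev : Option Char) (buf : List Char) : List Char :=
  if buf = [] then []
  else if (inl || disp) = true ∧ String.mk buf ∈ pvCmds ∧ prev ≠ some '\\' then '\\' :: buf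
  else buf

-- B's streaming loop: one character at a time, carrying (mode, prev char, run buffer)
def pvBLoop (cs : List Char) (inl disp : Bool) (prev : Option Char) (buf : List Char) : List Char :=
  match cs with
  | [] => pvFlush inl disp prev buf
  | c :: rest =>
    if c = '$' then
      if rest ≠ [] ∧ rest.headD ' ' = '$' then
        pvFlush inl disp prev buf ++ '$' :: '$' :: pvBLoop rest.tail inl (!disp) (some '$') []
      else
        pvFlush inl disp prev buf ++ '$' :: pvBLoop rest (if disp then inl else !inl) disp (some '$') []
    else if PySem.Chars.isalpha c = true then
      pvBLoop rest inl disp prev (buf ++ [c])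
    else
      pvFlush inl disp prev buf ++ c :: pvBLoop rest inl disp (some c) []
  termination_by cs.length
  decreasing_by
  · simp only [List.length_cons, List.length_tail]
    omega
  · simp
  · simp
  · simp

def repair_latex_in_math_py_alt (message : String) : String :=
  if message.toList = [] ∨ '$' ∉ message.toList then message
  else String.mk (pvBLoop message.toList false false none [])

-- ===== PRECONDITION & SPEC =====
def Spec_repair_latex_in_math_py (message : String) (out : String) : Prop := out = repair_latex_in_math_py_alt message
instance (message : String) (out : String) : Decidable (Spec_repair_latex_in_math_py message out) := by unfold Spec_repair_latex_in_math_py; infer_instance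

-- ===== CLAIM (what is proved, stated in full; the proofs are below) =====
def Claim_equal_repair_latex_in_math_py : Prop := ∀ (message : String), Dom_repair_latex_in_math_py message → Spec_repair_latex_in_math_py message (repair_latex_in_math_py message)

-- ===== LEMMAS AND PROOFS =====

-- the character immediately before position i (what B's 'prev' tracks at run starts)
def pvPrevOf (ms : List Char) (i : Nat) : Option Char :=
  if i = 0 then none else some (ms.getD (i - 1) ' ')

theorem pv_alpha_ne_dollar (c : Char) (h : PySem.Chars.isalpha c = true) : ¬ c = '$' := by
  intro he
  rw [he] at h
  exact absurd h (by decide)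

theorem pv_drop_cons (ms : List Char) (i : Nat) (h : i < ms.length) :
    ms.drop i = ms.getD i ' ' :: ms.drop (i + 1) := by
  rw [List.drop_eq_getElem_cons h]
  simp [List.getD, List.getElem?_eq_getElem h]

theorem pv_slice_cons (ms : List Char) (p j : Nat) (hp : p < j) (hj : j ≤ ms.length) :
    (ms.drop p).take (j - p) = ms.getD p ' ' :: (ms.drop (p + 1)).take (j - (p + 1)) := by
  have hplen : p < ms.length := lt_of_lt_of_le hp hj
  rw [List.drop_eq_getElem_cons hplen]
  have h1 : j - p = (j - (p + 1)) + 1 := by omega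
  rw [h1, List.take_succ_cons]
  simp [List.getD, List.getElem?_eq_getElem hplen]

theorem pvAlphaEnd_le (ts : List Char) (m k : Nat) (h : k ≤ m) : pvAlphaEnd ts m k ≤ m := by
  rw [pvAlphaEnd]
  split_ifs with hc
  · exact pvAlphaEnd_le ts m (k + 1) (by omega)
  · exact h
  termination_by m - k
  decreasing_by omega

theorem pvAlphaEnd_alpha (ms : List Char) (n j p : Nat) (h1 : j ≤ p)
    (h2 : p < pvAlphaEnd ms n j) : PySem.Chars.isalpha (ms.getD p ' ') = true := by
  rw [pvAlphaEnd] at h2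
  split_ifs at h2 with hc
  · by_cases hjp : j = p
    · exact hjp ▸ hc.2
    · exact pvAlphaEnd_alpha ms n (j + 1) p (by omega) h2
  · omega
  termination_by n - j
  decreasing_by omega

theorem pvAlphaEnd_stop (ms : List Char) (n j : Nat) (h : j ≤ n) :
    pvAlphaEnd ms n j = n ∨ PySem.Chars.isalpha (ms.getD (pvAlphaEnd ms n j) ' ') = false := by
  rw [pvAlphaEnd]
  split_ifs with hc
  · exact pvAlphaEnd_stop ms n (j + 1) (by omega)
  · by_cases hjn : j < n
    · right
      by_contra hd
      exact hc ⟨hjn, by revert hd; cases PySem.Chars.isalpha (ms.getD j ' ') <;> simp⟩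
    · left; omega
  termination_by n - j
  decreasing_by omega

theorem pvFlush_nil (inl disp : Bool) (prev : Option Char) :
    pvFlush inl disp prev [] = [] := by simp [pvFlush]

theorem pvFlush_buf (inl disp : Bool) (prev : Option Char) (buf : List Char)
    (h : (inl || disp) = true → buf = []) : pvFlush inl disp prev buf = buf := by
  unfold pvFlush
  split_ifs with h1 h2
  · exact h1.symm
  · exact absurd (h h2.1) h1
  · rfl

-- flushing commutes out of a step whose head is not alphabetic (or out of the end)
theorem pvB_split (cs : List Char) (inl disp : Bool) (prev q : Option Char) (buf : List Char)
    (h : cs = [] ∨ PySem.Chars.isalpha (cs.headD ' ') = false) :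
    pvBLoop cs inl disp prev buf = pvFlush inl disp prev buf ++ pvBLoop cs inl disp q [] := by
  cases cs with
  | nil => simp [pvBLoop, pvFlush_nil]
  | cons c rest =>
    have hna : PySem.Chars.isalpha c = false := by
      rcases h with h | h
      · exact absurd h (by simp)
      · exact h
    by_cases h1 : c = '$'
    · rw [pvBLoop, pvBLoop, if_pos h1, if_pos h1]
      by_cases h2 : rest ≠ [] ∧ rest.headD ' ' = '$'
      · rw [if_pos h2, if_pos h2]; simp [pvFlush_nil]
      · rw [if_neg h2, if_neg h2]; simp [pvFlush_nil]
    · rw [pvBLoop, pvBLoop, if_neg h1, if_neg h1,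
        if_neg (by simp [hna]), if_neg (by simp [hna])]
      simp [pvFlush_nil]

-- B consumes an alphabetic run by buffering it, leaving prev untouched
theorem pv_run (ms : List Char) (n : Nat) (hn : n = ms.length) (i j : Nat)
    (hij : i ≤ j) (hjn : j ≤ n)
    (halpha : ∀ k, i ≤ k → k < j → PySem.Chars.isalpha (ms.getD k ' ') = true)
    (inl disp : Bool) (prev : Option Char) (buf : List Char) :
    pvBLoop (ms.drop i) inl disp prev buf
      = pvBLoop (ms.drop j) inl disp prev (buf ++ (ms.drop i).take (j - i)) := by
  by_cases he : i = j
  · subst he; simp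
  · have hlt : i < j := by omega
    have hin : i < ms.length := by omega
    have ha : PySem.Chars.isalpha (ms.getD i ' ') = true := halpha i (le_refl i) hlt
    have hstep : pvBLoop (ms.drop i) inl disp prev buf
        = pvBLoop (ms.drop (i + 1)) inl disp prev (buf ++ [ms.getD i ' ']) := by
      rw [pv_drop_cons ms i hin, pvBLoop,
        if_neg (pv_alpha_ne_dollar _ ha), if_pos ha]
    rw [hstep, pv_run ms n hn (i + 1) j (by omega) hjn
      (fun k hk1 hk2 => halpha k (by omega) hk2) inl disp prev (buf ++ [ms.getD i ' '])]
    rw [pv_slice_cons ms i j hlt (hn ▸ hjn)]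
    simp
  termination_by j - i
  decreasing_by omega

-- main invariant: B from (position i, mode, prev, buffer) = buffer ++ A from i
theorem pv_main (ms : List Char) (n : Nat) (hn : n = ms.length) (i : Nat)
    (inl disp : Bool) (prev : Option Char) (buf : List Char) (hin : i ≤ n)
    (hmath : (inl || disp) = true → buf = [] ∧ prev = pvPrevOf ms i) :
    pvBLoop (ms.drop i) inl disp prev buf = buf ++ pvALoop ms n i inl disp := by
  have hfl : pvFlush inl disp prev buf = buf :=
    pvFlush_buf inl disp prev buf (fun h => (hmath h).1)
  by_cases hi : i < n
  · have hconsi : ms.drop i = ms.getD i ' ' :: ms.drop (i + 1) := pv_drop_cons ms i (by omega)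
    by_cases h1 : ms.getD i ' ' = '$' ∧ i + 1 < n ∧ ms.getD (i + 1) ' ' = '$'
    · -- '$$' : toggle display
      have hconsi1 : ms.drop (i + 1) = ms.getD (i + 1) ' ' :: ms.drop (i + 2) :=
        pv_drop_cons ms (i + 1) (by omega)
      have hB : pvBLoop (ms.drop i) inl disp prev buf
          = pvFlush inl disp prev buf ++ '$' :: '$' :: pvBLoop (ms.drop (i + 2)) inl (!disp) (some '$') [] := by
        rw [hconsi, pvBLoop, if_pos h1.1,
          if_pos (by rw [hconsi1]; exact ⟨by simp, h1.2.2⟩)]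
        rw [hconsi1]
        rfl
      have hA : pvALoop ms n i inl disp = '$' :: '$' :: pvALoop ms n (i + 2) inl (!disp) := by
        rw [pvALoop, dif_pos hi, if_pos h1]
      have hrec := pv_main ms n hn (i + 2) inl (!disp) (some '$') [] (by omega)
        (fun _ => ⟨rfl, by
          unfold pvPrevOf
          rw [if_neg (by omega)]
          have h21 : i + 2 - 1 = i + 1 := by omega
          rw [h21, h1.2.2]⟩)
      rw [hB, hfl, hrec, hA]
      simp
    · by_cases h2 : ms.getD i ' ' = '$'
      · -- single '$'
        have hno : ¬ (ms.drop (i + 1) ≠ [] ∧ (ms.drop (i + 1)).headD ' ' = '$') := by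
          intro hc
          have hlen : i + 1 < n := by
            by_contra hc2
            exact hc.1 (by rw [List.drop_eq_nil_iff]; omega)
          have : (ms.drop (i + 1)).headD ' ' = ms.getD (i + 1) ' ' := by
            rw [pv_drop_cons ms (i + 1) (by omega)]; rfl
          exact h1 ⟨h2, hlen, by rw [← this]; exact hc.2⟩
        have hB : pvBLoop (ms.drop i) inl disp prev buf
            = pvFlush inl disp prev buf ++ '$' ::
                pvBLoop (ms.drop (i + 1)) (if disp then inl else !inl) disp (some '$') [] := by
          rw [hconsi, pvBLoop, if_pos h2, if_neg hno]
        have hrec := pv_main ms n hn (i + 1) (if disp then inl else !inl) disp (some '$') []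
          (by omega) (fun _ => ⟨rfl, by
            unfold pvPrevOf
            rw [if_neg (by omega)]
            have h11 : i + 1 - 1 = i := by omega
            rw [h11, h2]⟩)
        cases hd : disp with
        | false =>
          subst hd
          have hA : pvALoop ms n i inl false = '$' :: pvALoop ms n (i + 1) (!inl) false := by
            rw [pvALoop, dif_pos hi, if_neg h1, if_pos ⟨h2, rfl⟩]
          rw [hB, hfl, hrec, hA]
          simp
        | true =>
          subst hd
          have hA : pvALoop ms n i inl true = ms.getD i ' ' :: pvALoop ms n (i + 1) inl true := by
            rw [pvALoop, dif_pos hi, if_neg h1, if_neg (by simp),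
              dif_neg (by intro hc; exact pv_alpha_ne_dollar _ hc.2 h2)]
          rw [hB, hfl, hrec, hA, h2]
          simp
      · by_cases ha : PySem.Chars.isalpha (ms.getD i ' ') = true
        · cases hm : (inl || disp) with
          | true =>
            -- math mode: A escapes the maximal run at once; B buffers then flushes it
            obtain ⟨hbuf, hprev⟩ := hmath hm
            subst hbuf
            set j := pvAlphaEnd ms n i with hjdef
            have hij : i < j := pvAlphaEnd_gt ms n i hi ha
            have hjn : j ≤ n := pvAlphaEnd_le ms n i (by omega)
            have hstop := pvAlphaEnd_stop ms n i (by omega)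
            set word := (ms.drop i).take (j - i) with hword
            have hA : pvALoop ms n i inl disp
                = (if ¬ (0 < i ∧ ms.getD (i - 1) ' ' = '\\') ∧ String.mk word ∈ pvCmds then
                    '\\' :: word else word) ++ pvALoop ms n j inl disp := by
              rw [pvALoop, dif_pos hi, if_neg h1,
                if_neg (by intro hc; exact h2 hc.1), dif_pos ⟨hm, ha⟩]
            have hBrun : pvBLoop (ms.drop i) inl disp prev []
                = pvBLoop (ms.drop j) inl disp prev word :=
              pv_run ms n hn i j (by omega) hjn
                (fun k hk1 hk2 => pvAlphaEnd_alpha ms n i k hk1 hk2) inl disp prev []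
            have hsplit : pvBLoop (ms.drop j) inl disp prev word
                = pvFlush inl disp prev word ++ pvBLoop (ms.drop j) inl disp (pvPrevOf ms j) [] := by
              apply pvB_split
              by_cases hjlt : j < n
              · right
                rw [pv_drop_cons ms j (by omega)]
                rcases hstop with h | h
                · omega
                · simpa using h
              · left; rw [List.drop_eq_nil_iff]; omega
            have hwne : ¬ word = [] := by
              have hwl : word.length = j - i := by
                simp only [hword, List.length_take, List.length_drop]
                omega
              intro hc
              rw [hc] at hwl
              simp at hwl
              omega
            have hpb : (prev ≠ some '\\') ↔ ¬ (0 < i ∧ ms.getD (i - 1) ' ' = '\\') := by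
              rw [hprev]
              unfold pvPrevOf
              by_cases hi0 : i = 0
              · simp [hi0]
              · simp [hi0, Nat.pos_of_ne_zero hi0]
            have hflw : pvFlush inl disp prev word
                = (if ¬ (0 < i ∧ ms.getD (i - 1) ' ' = '\\') ∧ String.mk word ∈ pvCmds then
                    '\\' :: word else word) := by
              unfold pvFlush
              rw [if_neg hwne]
              refine if_congr ?_ rfl rfl
              constructor
              · intro hc
                exact ⟨hpb.mp hc.2.2, hc.2.1⟩
              · intro hc
                exact ⟨hm, hc.2, hpb.mpr hc.1⟩
            have hrec := pv_main ms n hn j inl disp (pvPrevOf ms j) [] hjn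
              (fun _ => ⟨rfl, rfl⟩)
            rw [hBrun, hsplit, hflw, hrec, hA]
            simp
          | false =>
            -- non-math alphabetic char: A emits it; B buffers it
            have hA : pvALoop ms n i inl disp = ms.getD i ' ' :: pvALoop ms n (i + 1) inl disp := by
              rw [pvALoop, dif_pos hi, if_neg h1, if_neg (by intro hc; exact h2 hc.1),
                dif_neg (by intro hc; rw [hm] at hc; exact absurd hc.1 (by simp))]
            have hB : pvBLoop (ms.drop i) inl disp prev buf
                = pvBLoop (ms.drop (i + 1)) inl disp prev (buf ++ [ms.getD i ' ']) := by
              rw [hconsi, pvBLoop, if_neg h2, if_pos ha]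
            have hrec := pv_main ms n hn (i + 1) inl disp prev (buf ++ [ms.getD i ' '])
              (by omega) (fun hc => absurd hc (by simp [hm]))
            rw [hB, hrec, hA]
            simp
        · -- ordinary non-alphabetic char
          have hA : pvALoop ms n i inl disp = ms.getD i ' ' :: pvALoop ms n (i + 1) inl disp := by
            rw [pvALoop, dif_pos hi, if_neg h1, if_neg (by intro hc; exact h2 hc.1),
              dif_neg (by intro hc; exact ha hc.2)]
          have hB : pvBLoop (ms.drop i) inl disp prev buf
              = pvFlush inl disp prev buf ++ ms.getD i ' ' ::
                  pvBLoop (ms.drop (i + 1)) inl disp (some (ms.getD i ' ')) [] := by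
            rw [hconsi, pvBLoop, if_neg h2, if_neg ha]
          have hrec := pv_main ms n hn (i + 1) inl disp (some (ms.getD i ' ')) [] (by omega)
            (fun _ => ⟨rfl, by simp [pvPrevOf]⟩)
          rw [hB, hfl, hrec, hA]
          simp
  · have hdrop : ms.drop i = [] := by rw [List.drop_eq_nil_iff]; omega
    rw [hdrop, pvBLoop, hfl, pvALoop, dif_neg hi]
    simp
  termination_by n - i
  decreasing_by all_goals omega

-- ===== VERDICT (by name: the statement is the Claim_ definition above) =====
theorem repair_latex_in_math_py_spec : Claim_equal_repair_latex_in_math_py := by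
  intro message _
  unfold Spec_repair_latex_in_math_py repair_latex_in_math_py repair_latex_in_math_py_alt
  by_cases hc : message.toList = [] ∨ '$' ∉ message.toList
  · rw [if_pos hc, if_pos hc]
  · rw [if_neg hc, if_neg hc]
    exact congrArg String.mk (pv_main message.toList message.toList.length rfl 0 false false
      none [] (Nat.zero_le _) (fun _ => ⟨rfl, rfl⟩)).symm
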